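-- pv_equiv track=rewrite | github.com/azhagusiva11/Dec_EMR | utils/disease_bulk_importer.py | _categorize_symptoms
-- ===== SOURCE A (Python) =====
-- from typing import Dict, List, Optional
--
-- def _categorize_symptoms(symptoms: List[str]) -> Dict[str, List[str]]:
--     """Intelligently categorize symptoms"""
--     categories = {
--         "neurological": [],
--         "gastrointestinal": [],
--         "cardiovascular": [],
--         "respiratory": [],
--         "musculoskeletal": [],
--         "dermatological": [],
--         "ophthalmologic": [],
--         "psychiatric": [],
--         "endocrine": [],
--         "hematologic": [],
--         "renal": [],
--         "immunologic": [],
--         "other": []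
--     }
--
--     # Keywords for categorization
--     category_keywords = {
--         "neurological": ["tremor", "seizure", "headache", "numbness", "paralysis", "ataxia", "dystonia"],
--         "gastrointestinal": ["vomiting", "nausea", "diarrhea", "constipation", "abdominal", "hepat"],
--         "cardiovascular": ["chest pain", "palpitation", "hypertension", "hypotension", "heart"],
--         "respiratory": ["cough", "dyspnea", "wheeze", "breathing", "respiratory"],
--         "musculoskeletal": ["joint", "muscle", "bone", "arthralgia", "myalgia", "weakness"],
--         "dermatological": ["rash", "skin", "lesion", "pruritus", "eczema", "erythema"],
--         "ophthalmologic": ["vision", "eye", "blindness", "diplopia", "ptosis"],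
--         "psychiatric": ["depression", "anxiety", "psychosis", "mood", "behavior"],
--         "endocrine": ["diabetes", "thyroid", "hormone", "growth"],
--         "hematologic": ["anemia", "bleeding", "bruising", "thrombocytopenia"],
--         "renal": ["kidney", "renal", "proteinuria", "hematuria"],
--         "immunologic": ["immunodeficiency", "autoimmune", "allergy"]
--     }
--
--     for symptom in symptoms:
--         categorized = False
--         for category, keywords in category_keywords.items():
--             if any(keyword in symptom.lower() for keyword in keywords):
--                 categories[category].append(symptom)
--                 categorized = True
--                 break
--
--         if not categorized:
--             categories["other"].append(symptom)
--
--     # Remove empty categories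
--     return {k: v for k, v in categories.items() if v}
-- ===== SOURCE B (Python) =====
-- from typing import Dict, List, Optional
--
-- def _categorize_symptoms(symptoms: List[str]) -> Dict[str, List[str]]:
--     """Label each symptom once, then group by the fixed category order."""
--     category_keywords = {
--         "neurological": ["tremor", "seizure", "headache", "numbness", "paralysis", "ataxia", "dystonia"],
--         "gastrointestinal": ["vomiting", "nausea", "diarrhea", "constipation", "abdominal", "hepat"],
--         "cardiovascular": ["chest pain", "palpitation", "hypertension", "hypotension", "heart"],
--         "respiratory": ["cough", "dyspnea", "wheeze", "breathing", "respiratory"],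
--         "musculoskeletal": ["joint", "muscle", "bone", "arthralgia", "myalgia", "weakness"],
--         "dermatological": ["rash", "skin", "lesion", "pruritus", "eczema", "erythema"],
--         "ophthalmologic": ["vision", "eye", "blindness", "diplopia", "ptosis"],
--         "psychiatric": ["depression", "anxiety", "psychosis", "mood", "behavior"],
--         "endocrine": ["diabetes", "thyroid", "hormone", "growth"],
--         "hematologic": ["anemia", "bleeding", "bruising", "thrombocytopenia"],
--         "renal": ["kidney", "renal", "proteinuria", "hematuria"],
--         "immunologic": ["immunodeficiency", "autoimmune", "allergy"],
--     }
--
--     def classify(symptom):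
--         low = symptom.lower()
--         return next((cat for cat, kws in category_keywords.items()
--                      if any(k in low for k in kws)), "other")
--
--     labels = [(s, classify(s)) for s in symptoms]
--     order = list(category_keywords) + ["other"]
--     groups = [(cat, [s for s, c in labels if c == cat]) for cat in order]
--     return {cat: g for cat, g in groups if g}
-- ===== Notes on version B (the rewrite author's own statement) =====
-- stated objective: alternative
-- what changed: Replaced the per-symptom early-break append into a pre-built 13-bucket dict by a label-then-group-by: a classify helper (first matching category via next(), else 'other') labels every symptom in one pass, then the result is assembled per category from the labels.
import Mathlib
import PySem

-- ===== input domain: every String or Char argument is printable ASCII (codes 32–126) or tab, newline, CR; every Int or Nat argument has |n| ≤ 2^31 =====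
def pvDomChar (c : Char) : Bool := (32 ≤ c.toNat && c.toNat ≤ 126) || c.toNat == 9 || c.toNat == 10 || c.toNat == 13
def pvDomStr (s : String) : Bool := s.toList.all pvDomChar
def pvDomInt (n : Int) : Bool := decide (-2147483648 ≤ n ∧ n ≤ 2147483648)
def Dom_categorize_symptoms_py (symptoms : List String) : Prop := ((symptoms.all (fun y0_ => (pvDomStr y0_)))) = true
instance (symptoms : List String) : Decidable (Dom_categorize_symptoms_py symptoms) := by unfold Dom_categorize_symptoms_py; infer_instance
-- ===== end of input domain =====

-- B labels every symptom with its first matching category (else "other") in one pass,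
-- then groups the labelled symptoms by the fixed category order; same return value as A.

-- ===== PORT A =====

-- category_keywords (shared table: the identical literal appears in both Pythons)
def kwTable : List (String × List String) :=
  [ ("neurological", ["tremor", "seizure", "headache", "numbness", "paralysis", "ataxia", "dystonia"]),
    ("gastrointestinal", ["vomiting", "nausea", "diarrhea", "constipation", "abdominal", "hepat"]),
    ("cardiovascular", ["chest pain", "palpitation", "hypertension", "hypotension", "heart"]),
    ("respiratory", ["cough", "dyspnea", "wheeze", "breathing", "respiratory"]),
    ("musculoskeletal", ["joint", "muscle", "bone", "arthralgia", "myalgia", "weakness"]),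
    ("dermatological", ["rash", "skin", "lesion", "pruritus", "eczema", "erythema"]),
    ("ophthalmologic", ["vision", "eye", "blindness", "diplopia", "ptosis"]),
    ("psychiatric", ["depression", "anxiety", "psychosis", "mood", "behavior"]),
    ("endocrine", ["diabetes", "thyroid", "hormone", "growth"]),
    ("hematologic", ["anemia", "bleeding", "bruising", "thrombocytopenia"]),
    ("renal", ["kidney", "renal", "proteinuria", "hematuria"]),
    ("immunologic", ["immunodeficiency", "autoimmune", "allergy"]) ]

-- the `categories` dict literal of A: 13 keys, each an empty list, in source order
def initCats : PySem.Dict String (List String) :=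
  ((((((((((((((PySem.Dict.empty).insert "neurological" []).insert "gastrointestinal" []).insert
    "cardiovascular" []).insert "respiratory" []).insert "musculoskeletal" []).insert
    "dermatological" []).insert "ophthalmologic" []).insert "psychiatric" []).insert
    "endocrine" []).insert "hematologic" []).insert "renal" []).insert
    "immunologic" []).insert "other" [])

-- inner 'for category, keywords in category_keywords.items(): … break' of A;
-- the 'if not categorized' tail is the [] case (the break is the early return)
def aInner (symptom : String) (d : PySem.Dict String (List String)) :
    List (String × List String) → PySem.Dict String (List String)
  | [] => d.modify "other" [] (fun v => v ++ [symptom])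
  | ck :: rest =>
    if ck.2.any (fun kw => PySem.Str.isIn kw (PySem.Str.lower symptom)) then
      d.modify ck.1 [] (fun v => v ++ [symptom])
    else aInner symptom d rest

def categorize_symptoms_py (symptoms : List String) : List (String × List String) :=
  -- {k: v for k, v in categories.items() if v}
  (symptoms.foldl (fun d symptom => aInner symptom d kwTable) initCats).items.filter
    (fun kv => !kv.2.isEmpty)

-- ===== PORT B =====

-- order = list(category_keywords) + ["other"]
def allCats : List String :=
  ["neurological", "gastrointestinal", "cardiovascular", "respiratory", "musculoskeletal",
   "dermatological", "ophthalmologic", "psychiatric", "endocrine", "hematologic", "renal",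
   "immunologic", "other"]

-- classify(symptom): first category whose any keyword is in symptom.lower(), else "other"
def classify (symptom : String) : String :=
  match kwTable.find? (fun ck => ck.2.any (fun kw => PySem.Str.isIn kw (PySem.Str.lower symptom))) with
  | some ck => ck.1
  | none => "other"

def categorize_symptoms_py_alt (symptoms : List String) : List (String × List String) :=
  -- labels, then groups per category in fixed order, then drop empty groups
  (allCats.map (fun cat =>
      (cat, ((symptoms.map (fun s => (s, classify s))).filter (fun p => p.2 == cat)).map (·.1)))).filter
    (fun kv => !kv.2.isEmpty)

-- ===== PRECONDITION & SPEC =====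
def Spec_categorize_symptoms_py (symptoms : List String) (out : List (String × List String)) : Prop := out = categorize_symptoms_py_alt symptoms
instance (symptoms : List String) (out : List (String × List String)) : Decidable (Spec_categorize_symptoms_py symptoms out) := by unfold Spec_categorize_symptoms_py; infer_instance

-- ===== CLAIM (what is proved, stated in full; the proofs are below) =====
def Claim_equal_categorize_symptoms_py : Prop := ∀ (symptoms : List String), Dom_categorize_symptoms_py symptoms → Spec_categorize_symptoms_py symptoms (categorize_symptoms_py symptoms)

-- ===== LEMMAS AND PROOFS =====
set_option maxHeartbeats 1000000

-- classify generalized over the keyword table (the inner loop's remaining rows)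
def classifyOn (symptom : String) (l : List (String × List String)) : String :=
  match l.find? (fun ck => ck.2.any (fun kw => PySem.Str.isIn kw (PySem.Str.lower symptom))) with
  | some ck => ck.1
  | none => "other"

lemma classify_eq (s : String) : classify s = classifyOn s kwTable := rfl

lemma kw_fst_mem : ∀ p ∈ kwTable, p.1 ∈ allCats := by decide

lemma classifyOn_mem (s : String) (l : List (String × List String))
    (h : ∀ p ∈ l, p.1 ∈ allCats) : classifyOn s l ∈ allCats := by
  unfold classifyOn
  cases hf : l.find? (fun ck => ck.2.any (fun kw => PySem.Str.isIn kw (PySem.Str.lower s))) with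
  | none => decide
  | some ck => exact h ck (List.mem_of_find?_eq_some hf)

lemma classify_mem (s : String) : classify s ∈ allCats := by
  rw [classify_eq]; exact classifyOn_mem s kwTable kw_fst_mem

lemma aInner_eq (s : String) (d : PySem.Dict String (List String))
    (l : List (String × List String)) :
    aInner s d l = d.modify (classifyOn s l) [] (fun v => v ++ [s]) := by
  induction l with
  | nil => rfl
  | cons ck rest ih =>
    show (if (ck.2.any fun kw => PySem.Str.isIn kw (PySem.Str.lower s)) = true then _ else _) = _
    split
    next h =>
      unfold classifyOn
      rw [List.find?_cons, h]
    next h =>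
      rw [Bool.not_eq_true] at h
      rw [ih]
      unfold classifyOn
      rw [List.find?_cons, h]

lemma modify_items (d : PySem.Dict String (List String)) (f : String → List String)
    (k : String) (hk : k ∈ allCats) (g : List String → List String)
    (hd : d.items = allCats.map (fun c => (c, f c))) :
    (d.modify k [] g).items = allCats.map (fun c => (c, if c = k then g (f c) else f c)) := by
  have hkeys : d.keys = allCats := by
    simp [PySem.Dict.keys, hd, Function.comp_def]
  have hnd : d.keys.Nodup := by rw [hkeys]; decide
  have hmem : (k, f k) ∈ d.items := by
    rw [hd]; exact List.mem_map_of_mem hk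
  have hgetD : d.getD k [] = f k := PySem.Dict.getD_of_mem_items d hmem hnd []
  have hcont : d.contains k = true := by
    rw [PySem.Dict.contains_eq_decide_mem_keys, hkeys]
    simpa using hk
  rw [PySem.Dict.modify, PySem.Dict.items_insert_of_contains _ _ hcont, hgetD, hd,
    List.map_map]
  apply List.map_congr_left
  intro c _
  by_cases hck : c = k
  · subst hck; simp
  · simp [hck]

lemma foldl_items (xs : List String) :
    ∀ (d : PySem.Dict String (List String)) (f : String → List String),
    d.items = allCats.map (fun c => (c, f c)) →
    (xs.foldl (fun d symptom => aInner symptom d kwTable) d).items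
      = allCats.map (fun c => (c, f c ++ xs.filter (fun s => classify s == c))) := by
  induction xs with
  | nil => intro d f hd; simpa using hd
  | cons s xs ih =>
    intro d f hd
    rw [List.foldl_cons]
    rw [aInner_eq, ← classify_eq]
    rw [ih _ (fun c => if c = classify s then f c ++ [s] else f c)
        (modify_items d f (classify s) (classify_mem s) _ hd)]
    apply List.map_congr_left
    intro c _
    by_cases hcs : c = classify s
    · subst hcs
      simp
    · have : (classify s == c) = false := by
        simpa using Ne.symm hcs
      simp [hcs, this]

lemma init_items : initCats.items = allCats.map (fun c => (c, ([] : List String))) := by decide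

lemma labels_group (symptoms : List String) (c : String) :
    ((symptoms.map (fun s => (s, classify s))).filter (fun p => p.2 == c)).map (·.1)
      = symptoms.filter (fun s => classify s == c) := by
  induction symptoms with
  | nil => rfl
  | cons a l ih =>
    simp only [List.map_cons, List.filter_cons]
    cases h : (classify a == c) with
    | false => simpa [h] using ih
    | true => simpa [h] using ih

-- ===== VERDICT (by name: the statement is the Claim_ definition above) =====
theorem categorize_symptoms_py_spec : Claim_equal_categorize_symptoms_py := by
  intro symptoms _
  unfold Spec_categorize_symptoms_py categorize_symptoms_py categorize_symptoms_py_alt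
  rw [foldl_items symptoms initCats (fun _ => []) init_items]
  congr 1
  apply List.map_congr_left
  intro c _
  rw [labels_group]
  simp
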